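-- pv_equiv track=rewrite | github.com/aromyang/algorithm-baekjoon-programmers | 프로그래머스/3/68646. 풍선 터트리기/풍선 터트리기.py | solution
-- ===== SOURCE A (Python) =====
-- def solution(a):
--     n = len(a)
--
--     left_min = [0] * n
--     left_min[0] = a[0]
--
--     right_min = [0] * n
--     right_min[-1] = a[-1]
--
--     for i in range(1, n):
--         left_min[i] = min(left_min[i - 1], a[i])
--
--     for i in range(n - 2, -1, -1):
--         right_min[i] = min(right_min[i + 1], a[i])
--
--     answer = 0
--
--     for i in range(n):
--         if a[i] <= left_min[i] or a[i] <= right_min[i]: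
--             answer += 1
--
--     return answer
-- ===== SOURCE B (Python) =====
-- def solution(a):
--     n = len(a)
--     m = a[0]
--     survivors = {0}
--     for i in range(1, n):
--         if a[i] <= m:
--             survivors.add(i)
--             m = a[i]
--     m = a[-1]
--     survivors.add(n - 1)
--     for i in range(n - 2, -1, -1):
--         if a[i] <= m:
--             survivors.add(i)
--             m = a[i]
--     return len(survivors)
-- ===== Notes on version B (the rewrite author's own statement) =====
-- stated objective: simpler
-- what changed: A builds two full n-element min-arrays in two passes and then counts in a third pass; B keeps only a scalar running minimum plus a set of surviving indices and does two passes (left-to-right and right-to-left), returning the set's size.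
import Mathlib
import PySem

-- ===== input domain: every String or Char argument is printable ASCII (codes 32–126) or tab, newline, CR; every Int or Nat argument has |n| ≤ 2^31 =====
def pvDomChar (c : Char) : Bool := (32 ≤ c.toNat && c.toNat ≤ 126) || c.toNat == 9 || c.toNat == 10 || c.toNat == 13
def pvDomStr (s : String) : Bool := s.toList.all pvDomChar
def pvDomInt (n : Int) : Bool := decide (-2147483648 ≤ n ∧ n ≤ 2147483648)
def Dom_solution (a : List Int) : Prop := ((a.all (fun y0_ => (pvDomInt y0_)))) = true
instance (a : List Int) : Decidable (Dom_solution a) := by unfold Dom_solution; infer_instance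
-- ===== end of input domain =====

-- B replaces A's three passes over two full min-arrays by two passes that keep only a
-- scalar running minimum and a set of surviving indices (objective: simpler state, one pass fewer).

-- ===== PORT A =====
-- body of A's first for-loop: left_min[i] = min(left_min[i-1], a[i])
def aStepL (a : List Int) (lm : List Int) (i : Int) : List Int :=
  PySem.List.pySetD lm i (min (PySem.List.pyGetD lm (i - 1) 0) (PySem.List.pyGetD a i 0))

-- body of A's second for-loop: right_min[i] = min(right_min[i+1], a[i])
def aStepR (a : List Int) (rm : List Int) (i : Int) : List Int :=
  PySem.List.pySetD rm i (min (PySem.List.pyGetD rm (i + 1) 0) (PySem.List.pyGetD a i 0))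

def solution (a : List Int) : Int :=
  let n : Int := PySem.List.len a
  let left_min : List Int := List.replicate a.length (0 : Int)
  let left_min := PySem.List.pySetD left_min 0 (PySem.List.pyGetD a 0 0)
  let right_min : List Int := List.replicate a.length (0 : Int)
  let right_min := PySem.List.pySetD right_min (-1) (PySem.List.pyGetD a (-1) 0)
  let left_min := (PySem.List.pyRange 1 n 1).foldl (aStepL a) left_min
  let right_min := (PySem.List.pyRange (n - 2) (-1) (-1)).foldl (aStepR a) right_min
  (PySem.List.pyRange 0 n 1).foldl
    (fun answer i =>
      if PySem.List.pyGetD a i 0 ≤ PySem.List.pyGetD left_min i 0 ∨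
         PySem.List.pyGetD a i 0 ≤ PySem.List.pyGetD right_min i 0 then answer + 1 else answer) 0

-- ===== PORT B =====
-- body of BOTH of B's loops: if a[i] <= m: survivors.add(i); m = a[i]
def bStep (a : List Int) (st : Int × PySem.Set Int) (i : Int) : Int × PySem.Set Int :=
  if PySem.List.pyGetD a i 0 ≤ st.1 then (PySem.List.pyGetD a i 0, PySem.Set.add st.2 i) else st

def solution_alt (a : List Int) : Int :=
  let n : Int := PySem.List.len a
  let st := (PySem.List.pyRange 1 n 1).foldl (bStep a)
    (PySem.List.pyGetD a 0 0, PySem.Set.add PySem.Set.empty 0)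
  let st := (PySem.List.pyRange (n - 2) (-1) (-1)).foldl (bStep a)
    (PySem.List.pyGetD a (-1) 0, PySem.Set.add st.2 (n - 1))
  PySem.Set.len st.2

-- ===== PRECONDITION & SPEC =====
-- Pre_ excludes only the empty list, on which A raises IndexError (a[0]).
def Pre_solution (a : List Int) : Prop := a ≠ []
instance (a : List Int) : Decidable (Pre_solution a) := by unfold Pre_solution; infer_instance
def pvWitness_solution : List Int := [5, 3, 4]

def Spec_solution (a : List Int) (out : Int) : Prop := out = solution_alt a
instance (a : List Int) (out : Int) : Decidable (Spec_solution a out) := by unfold Spec_solution; infer_instance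

-- ===== CLAIM (what is proved, stated in full; the proofs are below) =====
def Claim_equal_solution : Prop := ∀ (a : List Int), Dom_solution a → Pre_solution a → Spec_solution a (solution a)

-- ===== LEMMAS AND PROOFS =====

-- prefix minimum pm a j = min(a[0], …, a[j]); suffix minimum sm a j = min(a[j], …, a[n-1])
def pm (a : List Int) : Nat → Int
  | 0 => a.getD 0 0
  | j + 1 => min (pm a j) (a.getD (j + 1) 0)

def sm (a : List Int) (j : Nat) : Int :=
  if _h : a.length ≤ j + 1 then a.getD j 0
  else min (sm a (j + 1)) (a.getD j 0)
termination_by a.length - j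

-- survive-from-the-left / survive-from-the-right conditions, on Int indices
def LcI (a : List Int) (i : Int) : Bool := decide (PySem.List.pyGetD a i 0 ≤ pm a i.toNat)
def RcI (a : List Int) (i : Int) : Bool := decide (PySem.List.pyGetD a i 0 ≤ sm a i.toNat)

theorem sm_last (a : List Int) (j : Nat) (h : a.length ≤ j + 1) : sm a j = a.getD j 0 := by
  rw [sm]; simp [h]

theorem sm_min (a : List Int) (j : Nat) (h : j + 1 < a.length) :
    sm a j = min (sm a (j + 1)) (a.getD j 0) := by
  rw [sm]; simp [Nat.not_le.mpr h]

theorem getD_set_self (l : List Int) (i : Nat) (v : Int) (h : i < l.length) :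
    (l.set i v).getD i 0 = v := by
  simp [List.getD, List.getElem?_set, h]

theorem getD_set_other (l : List Int) (i j : Nat) (v : Int) (h : i ≠ j) :
    (l.set i v).getD j 0 = l.getD j 0 := by
  simp [List.getD, List.getElem?_set, h]

theorem getD_replicate (n j : Nat) : (List.replicate n (0:Int)).getD j 0 = 0 := by
  simp [List.getD]

theorem countP_split {α : Type} (p q : α → Bool) (l : List α) :
    l.countP (fun x => p x || q x) = l.countP p + l.countP (fun x => q x && !p x) := by
  induction l with
  | nil => simp
  | cons x xs ih =>
    simp only [List.countP_cons, ih]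
    cases hp : p x <;> cases hq : q x <;> simp [hp, hq] <;> omega

theorem pyRange_neg_one_succ (a b : Int) (h : b ≤ a) :
    PySem.List.pyRange a (b - 1) (-1) = PySem.List.pyRange a b (-1) ++ [b] := by
  rw [PySem.List.pyRange_neg_one, PySem.List.pyRange_neg_one]
  have h1 : (a - (b - 1)).toNat = (a - b).toNat + 1 := by omega
  rw [h1, List.range_succ, List.map_append]
  congr 1
  simp only [List.map_cons, List.map_nil]
  congr 1
  omega

theorem pySetD_neg_one {v : Int} (xs : List Int) (h : xs ≠ []) :
    PySem.List.pySetD xs (-1) v = xs.set (xs.length - 1) v := by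
  have hl : 0 < xs.length := List.length_pos_iff.mpr h
  have h1 : (-(xs.length:Int) ≤ -1) := by omega
  simp [PySem.List.pySetD, PySem.List.pySet?, PySem.List.pyIdx?, h1]

-- ===== A-side characterisation =====

theorem length_foldl_aStepL (a : List Int) (l : List Int) (init : List Int) :
    (l.foldl (aStepL a) init).length = init.length := by
  induction l generalizing init with
  | nil => rfl
  | cons x xs ih => simp [List.foldl_cons, ih, aStepL, PySem.List.length_pySetD]

theorem length_foldl_aStepR (a : List Int) (l : List Int) (init : List Int) :
    (l.foldl (aStepR a) init).length = init.length := by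
  induction l generalizing init with
  | nil => rfl
  | cons x xs ih => simp [List.foldl_cons, ih, aStepR, PySem.List.length_pySetD]

theorem pyGetD_last (a : List Int) (ha : a ≠ []) :
    PySem.List.pyGetD a (-1) 0 = a.getD (a.length - 1) 0 := by
  have hn : 0 < a.length := List.length_pos_iff.mpr ha
  rw [PySem.List.pyGetD_neg_one a 0 ha]
  simp [List.getLast_eq_getElem, List.getD,
    List.getElem?_eq_getElem (by omega : a.length - 1 < a.length)]

theorem rmInit_eq (a : List Int) (ha : a ≠ []) :
    PySem.List.pySetD (List.replicate a.length (0:Int)) (-1) (PySem.List.pyGetD a (-1) 0)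
    = (List.replicate a.length (0:Int)).set (a.length - 1) (a.getD (a.length - 1) 0) := by
  have hn : 0 < a.length := List.length_pos_iff.mpr ha
  rw [pySetD_neg_one _ (by simp [List.replicate_eq_nil_iff]; omega), pyGetD_last a ha]
  simp

theorem leftA (a : List Int) (ha : a ≠ []) :
    ∀ k, 1 ≤ k → k ≤ a.length → ∀ j < a.length,
      ((PySem.List.pyRange 1 (k : Int) 1).foldl (aStepL a)
        (PySem.List.pySetD (List.replicate a.length 0) 0 (PySem.List.pyGetD a 0 0))).getD j 0
      = if j < k then pm a j else 0 := by
  have hn : 0 < a.length := List.length_pos_iff.mpr ha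
  intro k hk1
  induction k, hk1 using Nat.le_induction with
  | base =>
    intro _ j hj
    rw [show ((1:Nat):Int) = 1 by norm_num, PySem.List.pyRange_one_eq_nil le_rfl]
    simp only [List.foldl_nil]
    have h0 : PySem.List.pySetD (List.replicate a.length (0:Int)) 0 (PySem.List.pyGetD a 0 0)
        = (List.replicate a.length (0:Int)).set 0 (PySem.List.pyGetD a 0 0) := by
      simp [PySem.List.pySetD, PySem.List.pySet?, PySem.List.pyIdx?, hn]
    rw [h0]
    match j with
    | 0 =>
      rw [getD_set_self _ _ _ (by simpa using hn), if_pos (by omega)]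
      simp [pm, PySem.List.pyGetD_zero]
    | j + 1 =>
      rw [getD_set_other _ _ _ _ (by omega), getD_replicate, if_neg (by omega)]
  | succ k hk1 ih =>
    intro hk2 j hj
    have ih' := ih (by omega)
    obtain ⟨k', rfl⟩ : ∃ k', k = k' + 1 := ⟨k - 1, by omega⟩
    set L := (PySem.List.pyRange 1 ((k' + 1 : Nat) : Int) 1).foldl (aStepL a)
        (PySem.List.pySetD (List.replicate a.length 0) 0 (PySem.List.pyGetD a 0 0)) with hL
    have hlen : L.length = a.length := by
      rw [hL, length_foldl_aStepL]
      simp [PySem.List.length_pySetD]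
    have hrange : PySem.List.pyRange 1 ((k' + 1 + 1 : Nat) : Int) 1
        = PySem.List.pyRange 1 ((k' + 1 : Nat) : Int) 1 ++ [((k' + 1 : Nat) : Int)] := by
      push_cast
      rw [PySem.List.pyRange_one_succ_right (by omega)]
    rw [hrange, List.foldl_append, List.foldl_cons, List.foldl_nil, ← hL]
    show (aStepL a L ((k' + 1 : Nat) : Int)).getD j 0 = _
    unfold aStepL
    have hidx : ((k' + 1 : Nat) : Int) - 1 = ((k' : Nat) : Int) := by push_cast; ring
    rw [hidx, PySem.List.pySetD_natCast, PySem.List.pyGetD_natCast, PySem.List.pyGetD_natCast]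
    have hLk : L.getD k' 0 = pm a k' := by
      rw [ih' k' (by omega)]
      simp
    rw [hLk]
    have hmin : min (pm a k') (a.getD (k' + 1) 0) = pm a (k' + 1) := rfl
    rw [hmin]
    by_cases hjk : j = k' + 1
    · subst hjk
      rw [getD_set_self _ _ _ (by omega), if_pos (by omega)]
    · rw [getD_set_other _ _ _ _ (by omega), ih' j hj]
      by_cases h1 : j < k' + 1
      · rw [if_pos h1, if_pos (by omega)]
      · rw [if_neg h1, if_neg (by omega)]

theorem rightA (a : List Int) (ha : a ≠ []) :
    ∀ k, k ≤ a.length - 1 → ∀ j < a.length,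
      ((PySem.List.pyRange ((a.length : Int) - 2) ((k : Int) - 1) (-1)).foldl (aStepR a)
        (PySem.List.pySetD (List.replicate a.length 0) (-1) (PySem.List.pyGetD a (-1) 0))).getD j 0
      = if k ≤ j then sm a j else 0 := by
  have hn : 0 < a.length := List.length_pos_iff.mpr ha
  have main : ∀ t, t ≤ a.length - 1 → ∀ j < a.length,
      ((PySem.List.pyRange ((a.length : Int) - 2) (((a.length - 1 - t : Nat) : Int) - 1) (-1)).foldl (aStepR a)
        (PySem.List.pySetD (List.replicate a.length 0) (-1) (PySem.List.pyGetD a (-1) 0))).getD j 0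
      = if a.length - 1 - t ≤ j then sm a j else 0 := by
    intro t
    induction t with
    | zero =>
      intro _ j hj
      rw [PySem.List.pyRange_neg_one_eq_nil (by push_cast; omega), List.foldl_nil, rmInit_eq a ha]
      by_cases hjn : j = a.length - 1
      · subst hjn
        rw [getD_set_self _ _ _ (by simp; omega), if_pos (by omega),
          sm_last a (a.length - 1) (by omega)]
      · rw [getD_set_other _ _ _ _ (by omega), getD_replicate, if_neg (by omega)]
    | succ t iht =>
      intro ht j hj
      have ih' := iht (by omega)
      set k : Nat := a.length - 1 - (t + 1) with hk
      have hk1 : a.length - 1 - t = k + 1 := by omega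
      set R := (PySem.List.pyRange ((a.length : Int) - 2) (((a.length - 1 - t : Nat) : Int) - 1) (-1)).foldl (aStepR a)
        (PySem.List.pySetD (List.replicate a.length 0) (-1) (PySem.List.pyGetD a (-1) 0)) with hR
      have hlen : R.length = a.length := by
        rw [hR, length_foldl_aStepR, PySem.List.length_pySetD]
        simp
      have hrange : PySem.List.pyRange ((a.length : Int) - 2) (((k : Nat) : Int) - 1) (-1)
          = PySem.List.pyRange ((a.length : Int) - 2) (((a.length - 1 - t : Nat) : Int) - 1) (-1) ++ [((k : Nat) : Int)] := by
        have hb : ((a.length - 1 - t : Nat) : Int) - 1 = ((k : Nat) : Int) := by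
          push_cast [hk1]; omega
        rw [hb, pyRange_neg_one_succ _ _ (by omega)]
      rw [hrange, List.foldl_append, List.foldl_cons, List.foldl_nil, ← hR]
      show (aStepR a R ((k : Nat) : Int)).getD j 0 = _
      unfold aStepR
      have hidx : ((k : Nat) : Int) + 1 = ((k + 1 : Nat) : Int) := by push_cast; ring
      rw [hidx, PySem.List.pySetD_natCast, PySem.List.pyGetD_natCast, PySem.List.pyGetD_natCast]
      have hRk : R.getD (k + 1) 0 = sm a (k + 1) := by
        rw [hR, ih' (k + 1) (by omega), if_pos (by omega)]
      rw [hRk]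
      have hmin : min (sm a (k + 1)) (a.getD k 0) = sm a k := (sm_min a k (by omega)).symm
      rw [hmin]
      by_cases hjk : j = k
      · subst hjk
        rw [getD_set_self _ _ _ (by omega), if_pos le_rfl]
      · rw [getD_set_other _ _ _ _ (by omega), ih' j hj]
        by_cases h1 : k + 1 ≤ j
        · rw [if_pos (by omega), if_pos (by omega)]
        · rw [if_neg (by omega), if_neg (by omega)]
  intro k hkle j hj
  have := main (a.length - 1 - k) (by omega) j hj
  have he : a.length - 1 - (a.length - 1 - k) = k := by omega
  rw [he] at this
  exact this

theorem solution_eq_count (a : List Int) (ha : a ≠ []) :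
    solution a = ((PySem.List.pyRange 0 (a.length : Int) 1).countP
      (fun i => LcI a i || RcI a i) : Int) := by
  have hn : 0 < a.length := List.length_pos_iff.mpr ha
  have key : ∀ (LM RM : List Int),
      (∀ j < a.length, LM.getD j 0 = pm a j) →
      (∀ j < a.length, RM.getD j 0 = sm a j) →
      (PySem.List.pyRange 0 (a.length : Int) 1).foldl
        (fun answer i => if PySem.List.pyGetD a i 0 ≤ PySem.List.pyGetD LM i 0 ∨
          PySem.List.pyGetD a i 0 ≤ PySem.List.pyGetD RM i 0 then answer + 1 else answer) 0
      = ((PySem.List.pyRange 0 (a.length : Int) 1).countP (fun i => LcI a i || RcI a i) : Int) := by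
    intro LM RM hLM hRM
    rw [PySem.List.foldl_ite_add_one (p := fun i =>
      PySem.List.pyGetD a i 0 ≤ PySem.List.pyGetD LM i 0 ∨
      PySem.List.pyGetD a i 0 ≤ PySem.List.pyGetD RM i 0), zero_add]
    congr 1
    apply List.countP_congr
    intro i hi
    have hib : 0 ≤ i ∧ i < (a.length : Int) := PySem.List.mem_pyRange_one.mp hi
    obtain ⟨j, rfl⟩ : ∃ j : Nat, i = (j : Int) := ⟨i.toNat, by omega⟩
    have hj : j < a.length := by omega
    simp only [PySem.List.pyGetD_natCast, decide_eq_true_eq, LcI, RcI, Bool.or_eq_true,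
      Int.toNat_natCast]
    rw [hLM j hj, hRM j hj]
  simp only [solution, PySem.List.len_eq]
  refine key _ _ ?_ ?_
  · intro j hj
    have := leftA a ha a.length (by omega) le_rfl j hj
    rw [if_pos hj] at this
    exact this
  · intro j hj
    have := rightA a ha 0 (by omega) j hj
    rw [if_pos (by omega)] at this
    rw [show ((0 : Nat) : Int) - 1 = -1 by norm_num] at this
    exact this

-- ===== B-side characterisation =====

theorem leftB (a : List Int) (ha : a ≠ []) :
    ∀ k, 1 ≤ k → k ≤ a.length →
    (PySem.List.pyRange 1 (k : Int) 1).foldl (bStep a)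
      (PySem.List.pyGetD a 0 0, PySem.Set.add PySem.Set.empty 0)
    = (pm a (k - 1), (PySem.List.pyRange 0 (k : Int) 1).filter (LcI a)) := by
  have hn : 0 < a.length := List.length_pos_iff.mpr ha
  intro k hk1
  induction k, hk1 using Nat.le_induction with
  | base =>
    intro _
    rw [show ((1:Nat):Int) = 1 by norm_num, PySem.List.pyRange_one_eq_nil le_rfl, List.foldl_nil]
    have h01 : PySem.List.pyRange 0 1 1 = [0] := by
      have := PySem.List.pyRange_one_singleton (a := 0)
      norm_num at this
      exact this
    rw [h01]
    have hLc0 : LcI a 0 = true := by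
      simp [LcI, pm, PySem.List.pyGetD_zero]
    simp [PySem.Set.add, PySem.Set.contains, PySem.Set.empty, hLc0, pm,
      PySem.List.pyGetD_zero]
  | succ k hk1 ih =>
    intro hk2
    have ih' := ih (by omega)
    obtain ⟨k', rfl⟩ : ∃ k', k = k' + 1 := ⟨k - 1, by omega⟩
    have hrange : PySem.List.pyRange 1 ((k' + 1 + 1 : Nat) : Int) 1
        = PySem.List.pyRange 1 ((k' + 1 : Nat) : Int) 1 ++ [((k' + 1 : Nat) : Int)] := by
      push_cast
      rw [PySem.List.pyRange_one_succ_right (by omega)]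
    rw [hrange, List.foldl_append, ih', List.foldl_cons, List.foldl_nil]
    have hrange2 : PySem.List.pyRange 0 ((k' + 1 + 1 : Nat) : Int) 1
        = PySem.List.pyRange 0 ((k' + 1 : Nat) : Int) 1 ++ [((k' + 1 : Nat) : Int)] := by
      push_cast
      rw [PySem.List.pyRange_one_succ_right (by omega)]
    rw [hrange2, List.filter_append]
    set S := (PySem.List.pyRange 0 ((k' + 1 : Nat) : Int) 1).filter (LcI a) with hSdef
    have hnotmem : ((k' + 1 : Nat) : Int) ∉ S := by
      intro hmem
      have h1 := (List.mem_filter.mp hmem).1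
      have h2 := PySem.List.mem_pyRange_one.mp h1
      omega
    have hpm : pm a (k' + 1) = min (pm a k') (a.getD (k' + 1) 0) := rfl
    have hLck : LcI a ((k' + 1 : Nat) : Int) = decide (a.getD (k' + 1) 0 ≤ pm a k') := by
      simp only [LcI, PySem.List.pyGetD_natCast, Int.toNat_natCast, hpm]
      by_cases hc : a.getD (k' + 1) 0 ≤ pm a k' <;> simp [hc, le_min_iff]
    unfold bStep
    simp only [Nat.add_sub_cancel, PySem.List.pyGetD_natCast]
    by_cases hc : a.getD (k' + 1) 0 ≤ pm a k'
    · rw [if_pos hc]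
      have hadd : PySem.Set.add S ((k' + 1 : Nat) : Int) = S ++ [((k' + 1 : Nat) : Int)] := by
        unfold PySem.Set.add PySem.Set.contains
        rw [if_neg (by simp [List.contains_iff_mem]; exact hnotmem)]
      rw [hadd]
      have h1 : pm a (k' + 1) = a.getD (k' + 1) 0 := by rw [hpm, min_eq_right hc]
      have h2 : List.filter (LcI a) [((k' + 1 : Nat) : Int)] = [((k' + 1 : Nat) : Int)] := by
        rw [List.filter_cons_of_pos (by rw [hLck]; exact decide_eq_true hc), List.filter_nil]
      rw [h2, ← h1]
    · rw [if_neg hc]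
      have h1 : pm a (k' + 1) = pm a k' := by rw [hpm, min_eq_left (by omega)]
      have h2 : List.filter (LcI a) [((k' + 1 : Nat) : Int)] = [] := by
        rw [List.filter_cons_of_neg (by rw [hLck]; simpa using hc), List.filter_nil]
      rw [h2, ← h1, List.append_nil]

theorem rightB (a : List Int) (ha : a ≠ []) (S : List Int)
    (hS : ∀ i : Int, i ∈ S ↔ (0 ≤ i ∧ i < a.length ∧ LcI a i = true)) :
    ∀ k, k ≤ a.length - 1 →
    (PySem.List.pyRange ((a.length : Int) - 2) ((k : Int) - 1) (-1)).foldl (bStep a)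
      (PySem.List.pyGetD a (-1) 0, PySem.Set.add S ((a.length : Int) - 1))
    = (sm a k, S ++ (PySem.List.pyRange ((a.length : Int) - 1) ((k : Int) - 1) (-1)).filter
        (fun i => RcI a i && !LcI a i)) := by
  have hn : 0 < a.length := List.length_pos_iff.mpr ha
  have hcast : (a.length : Int) - 1 = ((a.length - 1 : Nat) : Int) := by omega
  have hRcLast : RcI a ((a.length : Int) - 1) = true := by
    rw [hcast]
    simp only [RcI, PySem.List.pyGetD_natCast, Int.toNat_natCast]
    rw [sm_last a (a.length - 1) (by omega)]
    simp
  have hadd : PySem.Set.add S ((a.length : Int) - 1)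
      = S ++ List.filter (fun i => RcI a i && !LcI a i) [(a.length : Int) - 1] := by
    unfold PySem.Set.add PySem.Set.contains
    by_cases hLc : LcI a ((a.length : Int) - 1) = true
    · rw [if_pos (by
        simp only [List.contains_iff_mem]
        exact (hS _).mpr ⟨by omega, by omega, hLc⟩)]
      rw [List.filter_cons_of_neg (by simp [hRcLast, hLc]), List.filter_nil, List.append_nil]
    · rw [if_neg (by
        simp only [List.contains_iff_mem]
        intro hmem
        exact hLc ((hS _).mp hmem).2.2)]
      rw [List.filter_cons_of_pos (by simp [hRcLast, hLc]), List.filter_nil]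
  have main : ∀ t, t ≤ a.length - 1 →
      (PySem.List.pyRange ((a.length : Int) - 2) (((a.length - 1 - t : Nat) : Int) - 1) (-1)).foldl (bStep a)
        (PySem.List.pyGetD a (-1) 0, PySem.Set.add S ((a.length : Int) - 1))
      = (sm a (a.length - 1 - t),
         S ++ (PySem.List.pyRange ((a.length : Int) - 1) (((a.length - 1 - t : Nat) : Int) - 1) (-1)).filter
            (fun i => RcI a i && !LcI a i)) := by
    intro t
    induction t with
    | zero =>
      intro _
      rw [PySem.List.pyRange_neg_one_eq_nil (by omega), List.foldl_nil]
      have hsing : PySem.List.pyRange ((a.length : Int) - 1) (((a.length - 1 - 0 : Nat) : Int) - 1) (-1)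
          = [(a.length : Int) - 1] := by
        have hb : ((a.length - 1 - 0 : Nat) : Int) - 1 = ((a.length : Int) - 1) - 1 := by omega
        rw [hb, pyRange_neg_one_succ _ _ le_rfl, PySem.List.pyRange_neg_one_eq_nil le_rfl,
          List.nil_append]
      rw [hsing, ← hadd]
      have hfst : PySem.List.pyGetD a (-1) 0 = sm a (a.length - 1 - 0) := by
        rw [pyGetD_last a ha, Nat.sub_zero, sm_last a (a.length - 1) (by omega)]
      rw [hfst]
    | succ t iht =>
      intro ht
      have ih' := iht (by omega)
      set k : Nat := a.length - 1 - (t + 1) with hk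
      have hk1 : a.length - 1 - t = k + 1 := by omega
      have hrange : PySem.List.pyRange ((a.length : Int) - 2) (((k : Nat) : Int) - 1) (-1)
          = PySem.List.pyRange ((a.length : Int) - 2) (((a.length - 1 - t : Nat) : Int) - 1) (-1)
            ++ [((k : Nat) : Int)] := by
        have hb : ((a.length - 1 - t : Nat) : Int) - 1 = ((k : Nat) : Int) := by omega
        rw [hb, pyRange_neg_one_succ _ _ (by omega)]
      rw [show ((a.length - 1 - (t + 1) : Nat) : Int) = ((k : Nat) : Int) by rw [← hk]]
      rw [hrange, List.foldl_append, ih', List.foldl_cons, List.foldl_nil]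
      have hrange2 : PySem.List.pyRange ((a.length : Int) - 1) (((k : Nat) : Int) - 1) (-1)
          = PySem.List.pyRange ((a.length : Int) - 1) (((a.length - 1 - t : Nat) : Int) - 1) (-1)
            ++ [((k : Nat) : Int)] := by
        have hb : ((a.length - 1 - t : Nat) : Int) - 1 = ((k : Nat) : Int) := by omega
        rw [hb, pyRange_neg_one_succ _ _ (by omega)]
      rw [hrange2, List.filter_append]
      set T := (PySem.List.pyRange ((a.length : Int) - 1) (((a.length - 1 - t : Nat) : Int) - 1) (-1)).filter
          (fun i => RcI a i && !LcI a i) with hT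
      have hsm : sm a k = min (sm a (k + 1)) (a.getD k 0) := sm_min a k (by omega)
      have hRck : RcI a ((k : Nat) : Int) = decide (a.getD k 0 ≤ sm a (k + 1)) := by
        simp only [RcI, PySem.List.pyGetD_natCast, Int.toNat_natCast, hsm]
        by_cases hc : a.getD k 0 ≤ sm a (k + 1) <;> simp [hc, le_min_iff]
      unfold bStep
      simp only [hk1, PySem.List.pyGetD_natCast]
      by_cases hc : a.getD k 0 ≤ sm a (k + 1)
      · rw [if_pos hc]
        have hfst : a.getD k 0 = sm a k := by rw [hsm, min_eq_right hc]
        by_cases hLc : LcI a ((k : Nat) : Int) = true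
        · have haddk : PySem.Set.add (S ++ T) ((k : Nat) : Int) = S ++ T := by
            unfold PySem.Set.add PySem.Set.contains
            rw [if_pos (by
              simp only [List.contains_iff_mem, List.mem_append]
              exact Or.inl ((hS _).mpr ⟨by omega, by omega, hLc⟩))]
          have hfk : List.filter (fun i => RcI a i && !LcI a i) [((k : Nat) : Int)] = [] := by
            rw [List.filter_cons_of_neg (by simp [hLc]), List.filter_nil]
          rw [haddk, hfk, List.append_nil, hfst]
        · have hknotT : ((k : Nat) : Int) ∉ T := by
            intro hmem
            have h1 := (List.mem_filter.mp hmem).1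
            have h2 := PySem.List.mem_pyRange_neg_one.mp h1
            omega
          have haddk : PySem.Set.add (S ++ T) ((k : Nat) : Int)
              = S ++ (T ++ [((k : Nat) : Int)]) := by
            unfold PySem.Set.add PySem.Set.contains
            rw [if_neg (by
              simp only [List.contains_iff_mem, List.mem_append]
              rintro (hmem | hmem)
              · exact hLc ((hS _).mp hmem).2.2
              · exact hknotT hmem), List.append_assoc]
          have hfk : List.filter (fun i => RcI a i && !LcI a i) [((k : Nat) : Int)]
              = [((k : Nat) : Int)] := by
            have h1 : RcI a ((k : Nat) : Int) = true := by
              rw [hRck]; exact decide_eq_true hc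
            have h2 : LcI a ((k : Nat) : Int) = false := by
              cases hML : LcI a ((k : Nat) : Int) with
              | false => rfl
              | true => exact absurd hML hLc
            rw [List.filter_cons_of_pos (by rw [h1, h2]; rfl), List.filter_nil]
          rw [haddk, hfk, hfst]
      · rw [if_neg hc]
        have hfst : sm a (k + 1) = sm a k := by rw [hsm, min_eq_left (by omega)]
        have hfk : List.filter (fun i => RcI a i && !LcI a i) [((k : Nat) : Int)] = [] := by
          have h1 : RcI a ((k : Nat) : Int) = false := by
            rw [hRck]; exact decide_eq_false hc
          rw [List.filter_cons_of_neg (by rw [h1]; simp), List.filter_nil]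
        rw [hfk, List.append_nil, hfst]
  intro k hkle
  have := main (a.length - 1 - k) (by omega)
  have he : a.length - 1 - (a.length - 1 - k) = k := by omega
  rw [he] at this
  exact this

theorem solution_alt_eq_count (a : List Int) (ha : a ≠ []) :
    solution_alt a = ((PySem.List.pyRange 0 (a.length : Int) 1).countP
      (fun i => LcI a i || RcI a i) : Int) := by
  have hn : 0 < a.length := List.length_pos_iff.mpr ha
  simp only [solution_alt, PySem.List.len_eq]
  rw [leftB a ha a.length (by omega) le_rfl]
  set SL := (PySem.List.pyRange 0 (a.length : Int) 1).filter (LcI a) with hSL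
  have hSmem : ∀ i : Int, i ∈ SL ↔ (0 ≤ i ∧ i < a.length ∧ LcI a i = true) := by
    intro i
    rw [hSL, List.mem_filter]
    constructor
    · rintro ⟨h1, h2⟩
      have := PySem.List.mem_pyRange_one.mp h1
      exact ⟨by omega, by omega, h2⟩
    · rintro ⟨h1, h2, h3⟩
      exact ⟨PySem.List.mem_pyRange_one.mpr ⟨h1, h2⟩, h3⟩
  have h2 := rightB a ha SL hSmem 0 (by omega)
  rw [show ((0 : Nat) : Int) - 1 = -1 by norm_num] at h2
  rw [h2]
  set T0 := (PySem.List.pyRange ((a.length : Int) - 1) (-1) (-1)).filter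
      (fun i => RcI a i && !LcI a i) with hT0
  have hrev : PySem.List.pyRange ((a.length : Int) - 1) (-1) (-1)
      = (PySem.List.pyRange 0 (a.length : Int) 1).reverse := by
    rw [PySem.List.pyRange_neg_one_eq_reverse]
    norm_num
  have hlen : (SL ++ T0).length
      = (PySem.List.pyRange 0 (a.length : Int) 1).countP (fun i => LcI a i || RcI a i) := by
    rw [List.length_append, hSL, hT0, hrev, ← List.countP_eq_length_filter,
      ← List.countP_eq_length_filter, List.countP_reverse, countP_split (LcI a) (RcI a)]
  simp only [PySem.Set.len, hlen]

-- ===== VERDICT (by name: the statement is the Claim_ definition above) =====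
theorem solution_spec : Claim_equal_solution := by
  intro a _hdom hpre
  unfold Spec_solution
  rw [solution_eq_count a hpre, solution_alt_eq_count a hpre]
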